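-- pv_equiv track=rewrite | github.com/tohidabedini/quantstats | quantstats/stats.py | find_rising_sequences
-- ===== SOURCE A (Python) =====
-- def find_rising_sequences(prices_list):
--     rising_sequences = []
--     current_sequence = []
--
--     for value in prices_list:
--         if not current_sequence or value > current_sequence[-1]:
--             current_sequence.append(value)
--         else:
--             if len(current_sequence) > 1:
--                 rising_sequences.append(current_sequence)
--             current_sequence = [value]
--
--     if len(current_sequence) > 1:
--         rising_sequences.append(current_sequence)
--
--     return rising_sequences
-- ===== SOURCE B (Python) =====
-- def find_rising_sequences(prices_list):
--     # Two-pointer boundary scan: advance j to the end of each maximal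
--     # strictly-rising run and slice it out, instead of growing/flushing
--     # an accumulator list element by element.
--     result = []
--     n = len(prices_list)
--     i = 0
--     while i < n:
--         j = i + 1
--         while j < n and prices_list[j] > prices_list[j - 1]:
--             j += 1
--         if j - i > 1:
--             result.append(prices_list[i:j])
--         i = j
--     return result
-- ===== Notes on version B (the rewrite author's own statement) =====
-- stated objective: alternative
-- what changed: Replaces the accumulator list that is grown element-by-element and flushed at each break by a two-pointer index scan that finds each run's end boundary and slices the run out in one step.
import Mathlib
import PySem

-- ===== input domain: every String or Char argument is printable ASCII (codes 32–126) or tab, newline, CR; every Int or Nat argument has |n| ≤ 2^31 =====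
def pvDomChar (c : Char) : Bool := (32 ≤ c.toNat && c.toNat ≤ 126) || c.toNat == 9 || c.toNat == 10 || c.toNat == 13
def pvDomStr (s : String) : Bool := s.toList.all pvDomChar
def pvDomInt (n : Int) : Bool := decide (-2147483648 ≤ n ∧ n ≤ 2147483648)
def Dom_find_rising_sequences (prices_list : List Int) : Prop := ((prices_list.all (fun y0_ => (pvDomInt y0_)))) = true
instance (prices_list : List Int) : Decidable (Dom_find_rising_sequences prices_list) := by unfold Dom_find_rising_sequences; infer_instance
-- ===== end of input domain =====

-- B changes the decomposition: a two-pointer boundary scan that slices each maximal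
-- strictly-rising run out at once, instead of A's accumulator list flushed at each break.

-- ===== PORT A =====
-- one loop step: if current is empty or value > current[-1] extend it, else flush (if len>1) and restart
-- (current_sequence[-1] is only read when current_sequence is nonempty, so getLastD 0 is exact)
def pvStepA (st : List (List Int) × List Int) (v : Int) : List (List Int) × List Int :=
  if st.2 = [] ∨ v > st.2.getLastD 0 then (st.1, st.2 ++ [v])
  else (if st.2.length > 1 then st.1 ++ [st.2] else st.1, [v])

def find_rising_sequences (prices_list : List Int) : List (List Int) :=
  let st := prices_list.foldl pvStepA ([], [])
  if st.2.length > 1 then st.1 ++ [st.2] else st.1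

-- ===== PORT B =====
-- inner while: advance j while j < n and prices_list[j] > prices_list[j-1]
-- (indices are in range 1 ≤ j whenever read, so getD 0 is exact)
def pvScanJ (p : List Int) (n : Nat) (j : Nat) : Nat :=
  if h : j < n ∧ p.getD j 0 > p.getD (j - 1) 0 then pvScanJ p n (j + 1) else j
termination_by n - j
decreasing_by omega

theorem pvScanJ_ge (p : List Int) (n : Nat) : ∀ j, j ≤ pvScanJ p n j := by
  intro j
  induction j using pvScanJ.induct p n with
  | case1 j h ih => rw [pvScanJ, dif_pos h]; omega
  | case2 j h => rw [pvScanJ, dif_neg h]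

-- outer while over i: slice out prices_list[i:j] when the run has length > 1
-- (the slice has 0 ≤ i ≤ j ≤ n, where it equals (take j).drop i)
def pvLoopI (p : List Int) (n : Nat) (acc : List (List Int)) (i : Nat) : List (List Int) :=
  if i < n then
    let j := pvScanJ p n (i + 1)
    pvLoopI p n (acc ++ (if j - i > 1 then [(p.take j).drop i] else [])) j
  else acc
termination_by n - i
decreasing_by have := pvScanJ_ge p n (i + 1); omega

def find_rising_sequences_alt (prices_list : List Int) : List (List Int) :=
  pvLoopI prices_list prices_list.length [] 0

-- ===== PRECONDITION & SPEC =====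
def Spec_find_rising_sequences (prices_list : List Int) (out : List (List Int)) : Prop := out = find_rising_sequences_alt prices_list
instance (prices_list : List Int) (out : List (List Int)) : Decidable (Spec_find_rising_sequences prices_list out) := by unfold Spec_find_rising_sequences; infer_instance

-- ===== CLAIM (what is proved, stated in full; the proofs are below) =====
def Claim_equal_find_rising_sequences : Prop := ∀ (prices_list : List Int), Dom_find_rising_sequences prices_list → Spec_find_rising_sequences prices_list (find_rising_sequences prices_list)

-- ===== LEMMAS AND PROOFS =====

-- length of the strictly-rising continuation of xs above l
def pvChain : Int → List Int → Nat
  | _, [] => 0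
  | l, x :: xs => if x > l then pvChain x xs + 1 else 0

-- reference form: peel each maximal rising run structurally
def pvAltL : List Int → List (List Int)
  | [] => []
  | x :: xs =>
    let c := pvChain x xs
    let t := pvAltL (xs.drop c)
    if c > 0 then (x :: xs.take c) :: t else t
termination_by l => l.length
decreasing_by simp

theorem scan_chain : ∀ (k : Nat) (p : List Int) (j : Nat), p.length - j ≤ k → 1 ≤ j →
    pvScanJ p p.length j = j + pvChain (p.getD (j - 1) 0) (p.drop j) := by
  intro k
  induction k with
  | zero =>
    intro p j hk hj
    have hlen : p.length ≤ j := by omega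
    rw [pvScanJ, dif_neg (by rintro ⟨h1, -⟩; omega)]
    rw [List.drop_eq_nil_of_le hlen]
    simp [pvChain]
  | succ k ih =>
    intro p j hk hj
    by_cases h : j < p.length ∧ p.getD j 0 > p.getD (j - 1) 0
    · rw [pvScanJ, dif_pos h]
      rw [ih p (j + 1) (by omega) (by omega)]
      have hd : p.drop j = p.getD j 0 :: p.drop (j + 1) := by
        rw [List.drop_eq_getElem_cons h.1]
        congr 1
        exact (List.getD_eq_getElem _ _ h.1).symm
      rw [hd, Nat.add_sub_cancel]
      simp only [pvChain]
      rw [if_pos h.2]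
      omega
    · rw [pvScanJ, dif_neg h]
      rcases Nat.lt_or_ge j p.length with hlt | hge
      · have hgt : ¬ p.getD j 0 > p.getD (j - 1) 0 := fun hh => h ⟨hlt, hh⟩
        have hd : p.drop j = p.getD j 0 :: p.drop (j + 1) := by
          rw [List.drop_eq_getElem_cons hlt]
          congr 1
          exact (List.getD_eq_getElem _ _ hlt).symm
        rw [hd]
        simp only [pvChain]
        rw [if_neg hgt]
        simp
      · rw [List.drop_eq_nil_of_le hge]
        simp [pvChain]

theorem loop_alt : ∀ (k : Nat) (p : List Int) (acc : List (List Int)) (i : Nat), p.length - i ≤ k →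
    pvLoopI p p.length acc i = acc ++ pvAltL (p.drop i) := by
  intro k
  induction k with
  | zero =>
    intro p acc i hk
    rw [pvLoopI, if_neg (by omega)]
    rw [List.drop_eq_nil_of_le (by omega)]
    simp [pvAltL]
  | succ k ih =>
    intro p acc i hk
    by_cases h : i < p.length
    · rw [pvLoopI, if_pos h]
      have hsc := scan_chain p.length p (i + 1) (by omega) (by omega)
      rw [Nat.add_sub_cancel] at hsc
      set c := pvChain (p.getD i 0) (p.drop (i + 1)) with hc
      rw [hsc]
      rw [ih p _ (i + 1 + c) (by omega)]
      have hd : p.drop i = p.getD i 0 :: p.drop (i + 1) := by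
        rw [List.drop_eq_getElem_cons h]
        congr 1
        exact (List.getD_eq_getElem _ _ h).symm
      have hdrop : p.drop (i + 1 + c) = (p.drop (i + 1)).drop c := by
        rw [List.drop_drop]
      have hslice : (p.take (i + 1 + c)).drop i = p.getD i 0 :: (p.drop (i + 1)).take c := by
        rw [List.drop_take, hd]
        have : i + 1 + c - i = c + 1 := by omega
        rw [this, List.take_succ_cons]
      have hcond : i + 1 + c - i > 1 ↔ c > 0 := by omega
      rw [hd, pvAltL]
      simp only [← hc, hdrop, hslice]
      by_cases hcp : c > 0
      · rw [if_pos (by omega : i + 1 + c - i > 1), if_pos hcp]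
        simp
      · rw [if_neg (by omega : ¬ i + 1 + c - i > 1), if_neg hcp]
        simp
    · rw [pvLoopI, if_neg h]
      rw [List.drop_eq_nil_of_le (by omega)]
      simp [pvAltL]

theorem keyA : ∀ (xs : List Int) (ris : List (List Int)) (run : List Int), run ≠ [] →
    (let st := xs.foldl pvStepA (ris, run);
     if st.2.length > 1 then st.1 ++ [st.2] else st.1)
    = ris ++ (if run.length + pvChain (run.getLastD 0) xs > 1
                then [run ++ xs.take (pvChain (run.getLastD 0) xs)] else [])
          ++ pvAltL (xs.drop (pvChain (run.getLastD 0) xs)) := by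
  intro xs
  induction xs with
  | nil =>
    intro ris run hr
    simp only [List.foldl_nil, pvChain, List.take_nil, List.drop_nil, Nat.add_zero,
      List.append_nil]
    by_cases hlen : run.length > 1
    · rw [if_pos hlen, if_pos hlen]
      simp [pvAltL]
    · rw [if_neg hlen, if_neg hlen]
      simp [pvAltL]
  | cons x xs ih =>
    intro ris run hr
    simp only [List.foldl_cons]
    by_cases hx : x > run.getLastD 0
    · rw [show pvStepA (ris, run) x = (ris, run ++ [x]) by
        simp only [pvStepA]; rw [if_pos (Or.inr hx)]]
      have h1 := ih ris (run ++ [x]) (by simp)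
      rw [h1]
      simp only [List.getLastD_concat, List.length_append, List.length_cons,
        List.length_nil, Nat.zero_add]
      have hch : pvChain (run.getLastD 0) (x :: xs) = pvChain x xs + 1 := by
        simp only [pvChain]; rw [if_pos hx]
      rw [hch, List.take_succ_cons, List.drop_succ_cons]
      have hn : run.length + (pvChain x xs + 1) = run.length + 1 + pvChain x xs := by omega
      rw [hn]
      congr 2
      simp
    · rw [show pvStepA (ris, run) x
          = ((if run.length > 1 then ris ++ [run] else ris), [x]) by
        simp only [pvStepA]
        rw [if_neg (by rintro (h | h); exact hr h; exact hx h)]]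
      have h1 := ih (if run.length > 1 then ris ++ [run] else ris) [x] (by simp)
      rw [h1]
      have hch : pvChain (run.getLastD 0) (x :: xs) = 0 := by
        simp only [pvChain]; rw [if_neg hx]
      rw [hch, List.take_zero, List.drop_zero]
      have hgl : ([x] : List Int).getLastD 0 = x := rfl
      simp only [hgl, List.length_cons, List.length_nil, Nat.zero_add,
        List.singleton_append, Nat.add_zero]
      rw [pvAltL]
      by_cases hc : pvChain x xs > 0
      · rw [if_pos (by omega : 1 + pvChain x xs > 1), if_pos hc]
        by_cases hlen : run.length > 1
        · rw [if_pos hlen, if_pos hlen]; try simp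
        · rw [if_neg hlen, if_neg hlen]; try simp
      · rw [if_neg (by omega : ¬ 1 + pvChain x xs > 1), if_neg hc]
        by_cases hlen : run.length > 1
        · rw [if_pos hlen, if_pos hlen]; try simp
        · rw [if_neg hlen, if_neg hlen]; try simp

theorem A_eq_altL (p : List Int) : find_rising_sequences p = pvAltL p := by
  cases p with
  | nil => simp [find_rising_sequences, pvAltL]
  | cons x xs =>
    simp only [find_rising_sequences, List.foldl_cons]
    rw [show pvStepA ([], []) x = ([], [x]) by simp [pvStepA]]
    have h1 := keyA xs [] [x] (by simp)
    simp only at h1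
    rw [h1]
    have hgl : ([x] : List Int).getLastD 0 = x := rfl
    simp only [hgl, List.length_cons, List.length_nil, Nat.zero_add,
      List.singleton_append, List.nil_append]
    rw [pvAltL]
    by_cases hc : pvChain x xs > 0
    · rw [if_pos (by omega : 1 + pvChain x xs > 1), if_pos hc]; try simp
    · rw [if_neg (by omega : ¬ 1 + pvChain x xs > 1), if_neg hc]; try simp

theorem B_eq_altL (p : List Int) : find_rising_sequences_alt p = pvAltL p := by
  have h := loop_alt p.length p [] 0 (by omega)
  simpa [find_rising_sequences_alt] using h

-- ===== VERDICT (by name: the statement is the Claim_ definition above) =====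
theorem find_rising_sequences_spec : Claim_equal_find_rising_sequences := by
  intro p _
  unfold Spec_find_rising_sequences
  rw [A_eq_altL, B_eq_altL]
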